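-- pv_equiv track=rewrite | github.com/AlgoZenithNITC/GFG_POTD_Solutions_AlgoZenithNITC | 09-08-2024_Maximize Array Value After Rearrangement.py | Maximize
-- ===== SOURCE A (Python) =====
-- def Maximize(arr):
--
--     n = len(arr)
--     arr.sort()  #sorting the array
--
--     mod = 1000000007  #taking modulo for large values
--
--     s = 0  #variable to store the sum
--
--     for i in range(n):
--         s += arr[
--             i] * i  #calculating the sum of array elements multiplied by their index
--         s = s % mod  #taking modulo to avoid large sum value
--
--     return s % mod  #returning the final sum after taking modulo.
-- ===== SOURCE B (Python) =====
-- def Maximize(arr):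
--     arr.sort()
--     mod = 1000000007
--     suf = 0
--     s = 0
--     for i in range(len(arr) - 1, 0, -1):
--         suf += arr[i]
--         s += suf
--     return s % mod
-- ===== Notes on version B (the rewrite author's own statement) =====
-- stated objective: alternative
-- what changed: B replaces the per-index multiplication sum(i*arr[i]) with a reverse pass accumulating suffix sums (sum of running suffix totals), taking a single modulo at the end instead of one per iteration; arr is still sorted in place.
import Mathlib
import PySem

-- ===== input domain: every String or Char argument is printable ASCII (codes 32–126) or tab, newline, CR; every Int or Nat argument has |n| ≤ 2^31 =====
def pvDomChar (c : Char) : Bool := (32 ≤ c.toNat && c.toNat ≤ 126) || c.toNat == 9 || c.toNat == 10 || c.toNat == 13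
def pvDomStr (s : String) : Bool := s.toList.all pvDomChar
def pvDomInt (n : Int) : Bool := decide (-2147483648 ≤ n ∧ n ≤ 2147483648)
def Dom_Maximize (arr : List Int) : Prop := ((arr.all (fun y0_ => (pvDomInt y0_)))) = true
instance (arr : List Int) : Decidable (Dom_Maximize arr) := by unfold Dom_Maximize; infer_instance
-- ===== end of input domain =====

-- Equivalence is about the RETURN value; both A and B sort arr in place (the same mutation).

-- ===== PORT A =====
-- s accumulates arr[i]*i with a modulo after every addition, over i in range(n).
def Maximize (arr : List Int) : Int :=
  let n : Int := arr.length
  let a := PySem.List.sorted arr (fun x => x) false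
  let s : Int := (PySem.List.pyRange 0 n 1).foldl
    (fun s i => PySem.Int.mod (s + PySem.List.pyGetD a i 0 * i) 1000000007) 0
  PySem.Int.mod s 1000000007

-- ===== PORT B =====
-- reverse pass i = n-1 … 1: suf += a[i]; s += suf; single modulo at the end.
def Maximize_alt (arr : List Int) : Int :=
  let a := PySem.List.sorted arr (fun x => x) false
  let n : Int := a.length
  let r : Int × Int := (PySem.List.pyRange (n - 1) 0 (-1)).foldl
    (fun st i => (st.1 + PySem.List.pyGetD a i 0, st.2 + (st.1 + PySem.List.pyGetD a i 0))) (0, 0)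
  PySem.Int.mod r.2 1000000007

-- ===== PRECONDITION & SPEC =====
def Spec_Maximize (arr : List Int) (out : Int) : Prop := out = Maximize_alt arr
instance (arr : List Int) (out : Int) : Decidable (Spec_Maximize arr out) := by unfold Spec_Maximize; infer_instance

-- ===== CLAIM (what is proved, stated in full; the proofs are below) =====
def Claim_equal_Maximize : Prop := ∀ (arr : List Int), Dom_Maximize arr → Spec_Maximize arr (Maximize arr)

-- ===== LEMMAS AND PROOFS =====

-- A's loop with a modulo per step computes the modulo of the plain sum.
theorem pvFoldMod (L : List Int) (g : Int → Int) (x : Int) (hx : x % 1000000007 = x) :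
    L.foldl (fun s i => (s + g i) % 1000000007) x
      = (x + (L.map g).sum) % 1000000007 := by
  induction L generalizing x with
  | nil =>
      simp only [List.foldl_nil, List.map_nil, List.sum_nil, add_zero]
      exact hx.symm
  | cons h t ih =>
      simp only [List.foldl_cons, List.map_cons, List.sum_cons]
      rw [ih _ (Int.emod_emod_of_dvd _ dvd_rfl), ← hx, Int.emod_add_emod, hx]
      ring_nf

-- the weighted sum Σ_{j=1}^{m} j * a[j]
def pvQ (a : List Int) (m : Nat) : Int :=
  ((List.range m).map (fun j : Nat => (((j + 1 : Nat)) : Int) * a.getD (j + 1) 0)).sum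

-- the suffix sum Σ_{j=1}^{m} a[j]
def pvP (a : List Int) (m : Nat) : Int :=
  ((List.range m).map (fun j : Nat => a.getD (j + 1) 0)).sum

-- B's countdown fold, characterised in closed form.
theorem pvBfold (a : List Int) (m : Nat) (suf s : Int) :
    (PySem.List.pyRange (m : Int) 0 (-1)).foldl
      (fun st i => (st.1 + PySem.List.pyGetD a i 0, st.2 + (st.1 + PySem.List.pyGetD a i 0))) (suf, s)
      = (suf + pvP a m, s + m * suf + pvQ a m) := by
  induction m generalizing suf s with
  | zero =>
      rw [PySem.List.pyRange_neg_one_eq_nil (by norm_num)]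
      simp [pvP, pvQ]
  | succ k ih =>
      rw [show ((k + 1 : Nat) : Int) = (k : Int) + 1 by push_cast; ring,
        PySem.List.pyRange_neg_one_cons (by positivity)]
      simp only [List.foldl_cons]
      rw [show (k : Int) + 1 - 1 = (k : Int) by ring, ih]
      have hg : PySem.List.pyGetD a ((k : Int) + 1) 0 = a.getD (k + 1) 0 := by
        rw [show ((k : Int) + 1) = ((k + 1 : Nat) : Int) by push_cast; ring,
          PySem.List.pyGetD_natCast]
      rw [hg]
      simp only [pvP, pvQ, List.range_succ, List.map_append, List.sum_append,
        List.map_cons, List.map_nil, List.sum_cons, List.sum_nil]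
      simp only [Prod.mk.injEq]
      constructor <;> (push_cast; ring)

-- Σ_{k=0}^{m} a[k]*k = Σ_{j=1}^{m} j*a[j]
theorem pvAsum (a : List Int) (m : Nat) :
    ((List.range (m + 1)).map (fun k => a.getD k 0 * (k : Int))).sum = pvQ a m := by
  rw [List.range_succ_eq_map]
  simp only [List.map_cons, List.map_map, List.sum_cons, pvQ]
  have : ((List.range m).map ((fun k => a.getD k 0 * (k : Int)) ∘ (fun i => i + 1))).sum
      = ((List.range m).map (fun j : Nat => (((j + 1 : Nat)) : Int) * a.getD (j + 1) 0)).sum := by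
    apply congrArg
    apply List.map_congr_left
    intro j _
    simp [Function.comp]
    ring
  rw [this]
  simp

theorem Maximize_eq (arr : List Int) : Maximize arr = Maximize_alt arr := by
  unfold Maximize Maximize_alt
  set a := PySem.List.sorted arr (fun x => x) false with ha
  have hlen : a.length = arr.length := PySem.List.length_sorted ..
  simp only [← hlen]
  cases a with
  | nil => decide
  | cons h t =>
      set l := h :: t with hl
      have hn : l.length = t.length + 1 := rfl
      have hp : (0 : Int) < 1000000007 := by norm_num
      -- A side
      have hA : (PySem.List.pyRange 0 (l.length : Int) 1).foldl
          (fun s i => PySem.Int.mod (s + PySem.List.pyGetD l i 0 * i) 1000000007) 0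
          = PySem.Int.mod (pvQ l t.length) 1000000007 := by
        have hmod : ∀ s i : Int, PySem.Int.mod (s + PySem.List.pyGetD l i 0 * i) 1000000007
            = (s + PySem.List.pyGetD l i 0 * i) % 1000000007 :=
          fun s i => PySem.Int.mod_eq_emod_of_pos hp
        simp only [hmod]
        rw [pvFoldMod (PySem.List.pyRange 0 (l.length : Int) 1) (fun i => PySem.List.pyGetD l i 0 * i) 0 (by decide)]
        rw [PySem.List.pyRange_one]
        simp only [zero_add, Int.sub_zero, Int.toNat_natCast, List.map_map]
        have hmap : (List.range l.length).map ((fun i => PySem.List.pyGetD l i 0 * i) ∘ (fun k : Nat => (k : Int)))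
            = (List.range l.length).map (fun k => l.getD k 0 * (k : Int)) := by
          apply List.map_congr_left
          intro k _
          simp [Function.comp, PySem.List.pyGetD_natCast]
        rw [hmap, hn, pvAsum, PySem.Int.mod_eq_emod_of_pos hp]
      -- B side
      have hB : (PySem.List.pyRange ((l.length : Int) - 1) 0 (-1)).foldl
          (fun st : Int × Int => fun i => (st.1 + PySem.List.pyGetD l i 0, st.2 + (st.1 + PySem.List.pyGetD l i 0))) (0, 0)
          = (pvP l t.length, pvQ l t.length) := by
        rw [show (l.length : Int) - 1 = (t.length : Int) by rw [hn]; push_cast; ring]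
        rw [pvBfold]
        simp
      rw [hA, hB]
      simp only [PySem.Int.mod_eq_emod_of_pos hp]
      exact Int.emod_emod_of_dvd _ dvd_rfl

-- ===== VERDICT (by name: the statement is the Claim_ definition above) =====
theorem Maximize_spec : Claim_equal_Maximize := by
  intro arr _
  unfold Spec_Maximize
  exact Maximize_eq arr
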